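-- pv_equiv track=rewrite | github.com/anamarijapapic/uup-vjezbe | lab-09/vj9-zad3.py | jedvrijednosti
-- ===== SOURCE A (Python) =====
-- def jedvrijednosti(lst):
--     for e in lst:
--         brojac = 0
--         for el in lst:
--             if e == el:
--                 brojac += 1 # postoji vec element iste vrijednosti u listi
--         if brojac == len(lst):
--                 return True, True # brojac jednak duzini liste (broju el. liste) --> svi clanovi jednaki
--         elif brojac >= 2: # nadeno je 2 ili vise istih elemenata u listi
--                 return False, True
--     return False, False
-- ===== SOURCE B (Python) =====
-- def jedvrijednosti(lst):
--     if not lst: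
--         return False, False
--     if all(x == lst[0] for x in lst):
--         return True, True
--     return False, len(set(lst)) != len(lst)
-- ===== Notes on version B (the rewrite author's own statement) =====
-- stated objective: simpler
-- what changed: Replaced A's nested per-element counting loop with an empty guard, one all-equal-to-first scan, and a set-based duplicate test len(set(lst)) != len(lst).
import Mathlib
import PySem

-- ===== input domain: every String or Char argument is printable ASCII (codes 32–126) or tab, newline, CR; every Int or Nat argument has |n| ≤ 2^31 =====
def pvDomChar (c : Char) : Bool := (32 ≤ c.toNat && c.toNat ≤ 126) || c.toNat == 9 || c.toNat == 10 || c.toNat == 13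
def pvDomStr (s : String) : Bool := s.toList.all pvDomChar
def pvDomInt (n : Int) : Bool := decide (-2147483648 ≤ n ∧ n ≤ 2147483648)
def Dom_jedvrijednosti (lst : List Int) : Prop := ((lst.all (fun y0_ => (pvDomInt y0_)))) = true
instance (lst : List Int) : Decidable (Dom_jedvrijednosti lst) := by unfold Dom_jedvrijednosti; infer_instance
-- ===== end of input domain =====

-- B replaces A's nested per-element counting loop by an empty guard, one all-equal-to-first
-- scan, and a set-based duplicate test (simpler; no speed claim).

-- ===== PORT A =====
-- inner loop: brojac = 0; for el in lst: if e == el: brojac += 1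
def pvBrojac (e : Int) (lst : List Int) : Nat :=
  lst.foldl (fun brojac el => if e == el then brojac + 1 else brojac) 0

-- outer loop with its two early returns
def pvLoopA (lst : List Int) : List Int → Bool × Bool
  | [] => (false, false)
  | e :: rest =>
    let brojac := pvBrojac e lst
    if brojac = lst.length then (true, true)
    else if 2 ≤ brojac then (false, true)
    else pvLoopA lst rest

def jedvrijednosti (lst : List Int) : Bool × Bool := pvLoopA lst lst

-- ===== PORT B =====
def jedvrijednosti_alt (lst : List Int) : Bool × Bool :=
  match lst with
  | [] => (false, false)
  | h :: _ =>
    if lst.all (fun x => x == h) then (true, true)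
    else (false, decide (PySem.Set.len (PySem.Set.ofList lst) ≠ (lst.length : Int)))

-- ===== PRECONDITION & SPEC =====
def Spec_jedvrijednosti (lst : List Int) (out : Bool × Bool) : Prop := out = jedvrijednosti_alt lst
instance (lst : List Int) (out : Bool × Bool) : Decidable (Spec_jedvrijednosti lst out) := by unfold Spec_jedvrijednosti; infer_instance

-- ===== CLAIM (what is proved, stated in full; the proofs are below) =====
def Claim_equal_jedvrijednosti : Prop := ∀ (lst : List Int), Dom_jedvrijednosti lst → Spec_jedvrijednosti lst (jedvrijednosti lst)

-- ===== LEMMAS AND PROOFS =====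

theorem pvBrojac_eq_count (e : Int) (lst : List Int) : pvBrojac e lst = lst.count e := by
  have key : ∀ (l : List Int) (n : Nat),
      l.foldl (fun brojac el => if e == el then brojac + 1 else brojac) n = n + l.count e := by
    intro l
    induction l with
    | nil => intro n; simp [List.count]
    | cons x xs ih =>
      intro n
      simp only [List.foldl]
      rw [ih, List.count_cons]
      by_cases h : e = x
      · subst h; simp; omega
      · simp [h, Ne.symm h]
  unfold pvBrojac
  rw [key lst 0]
  omega

-- once no element's count can equal the length, the outer loop is a pure duplicate search
theorem pvLoopA_char (lst : List Int)
    (hne : ∀ e ∈ lst, lst.count e ≠ lst.length) :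
    ∀ rest : List Int, (∀ e ∈ rest, e ∈ lst) →
      pvLoopA lst rest = (false, decide (∃ e ∈ rest, 2 ≤ lst.count e)) := by
  intro rest
  induction rest with
  | nil => intro _; simp [pvLoopA]
  | cons e rs ih =>
    intro hmem
    have hel : e ∈ lst := hmem e (by simp)
    have h1 : lst.count e ≠ lst.length := hne e hel
    by_cases h2 : 2 ≤ lst.count e
    · simp [pvLoopA, pvBrojac_eq_count, h1, h2]
    · have := ih (fun x hx => hmem x (by simp [hx]))
      simp [pvLoopA, pvBrojac_eq_count, h1, h2, this]

theorem ofList_len_ne_iff (lst : List Int) :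
    (PySem.Set.len (PySem.Set.ofList lst) ≠ (lst.length : Int)) ↔ ¬ lst.Nodup := by
  constructor
  · intro h hnd
    exact h (by rw [PySem.Set.ofList_eq_self_of_nodup lst hnd]; rfl)
  · intro hnd h
    apply hnd
    have hlen : (PySem.Set.ofList lst).length = lst.length := by
      simpa [PySem.Set.len] using h
    have hnodup : (PySem.Set.ofList lst).Nodup := by
      rw [← PySem.List.dedup_eq_ofList]; exact PySem.List.nodup_dedup lst
    have htf : (PySem.Set.ofList lst).toFinset = lst.toFinset := by
      apply Finset.ext
      intro a
      simp only [List.mem_toFinset]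
      rw [← PySem.List.dedup_eq_ofList]
      exact PySem.List.mem_dedup lst a
    have hcard : lst.toFinset.card = lst.length := by
      rw [← htf, List.toFinset_card_of_nodup hnodup, hlen]
    have hded : lst.dedup.length = lst.length := by
      rw [← List.card_toFinset]; exact hcard
    have : lst.dedup = lst := (List.dedup_sublist lst).eq_of_length hded
    rw [← this]; exact List.nodup_dedup lst

theorem exists_count_two_iff (lst : List Int) :
    (∃ e ∈ lst, 2 ≤ lst.count e) ↔ ¬ lst.Nodup := by
  rw [List.nodup_iff_count_le_one]
  constructor
  · rintro ⟨e, _, h2⟩ hall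
    have := hall e
    omega
  · intro h
    push_neg at h
    obtain ⟨a, ha⟩ := h
    refine ⟨a, ?_, by omega⟩
    exact List.count_pos_iff.mp (by omega)

-- ===== VERDICT (by name: the statement is the Claim_ definition above) =====
theorem jedvrijednosti_spec : Claim_equal_jedvrijednosti := by
  intro lst _
  unfold Spec_jedvrijednosti
  match hl : lst with
  | [] => rfl
  | h :: t =>
    by_cases hall : ∀ x ∈ h :: t, x = h
    · -- all elements equal the head: both sides return (true, true)
      have hc : (h :: t).count h = (h :: t).length :=
        List.count_eq_length.mpr (fun b hb => (hall b hb).symm)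
      have hA : jedvrijednosti (h :: t) = (true, true) := by
        simp [jedvrijednosti, pvLoopA, pvBrojac_eq_count, hc]
      have hB : jedvrijednosti_alt (h :: t) = (true, true) := by
        have : (h :: t).all (fun x => x == h) = true := by
          simp only [List.all_eq_true]
          intro x hx; simp [hall x hx]
        simp [jedvrijednosti_alt, this]
      rw [hA, hB]
    · -- not all equal: no count reaches the length, both sides test for duplicates
      have hne : ∀ e ∈ h :: t, (h :: t).count e ≠ (h :: t).length := by
        intro e he hc
        have hall' := List.count_eq_length.mp hc
        exact hall (fun x hx => by rw [← hall' x hx, ← hall' h (by simp)])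
      have hA := pvLoopA_char (h :: t) hne (h :: t) (fun _ hx => hx)
      have hB : jedvrijednosti_alt (h :: t)
          = (false, decide (PySem.Set.len (PySem.Set.ofList (h :: t)) ≠ ((h :: t).length : Int))) := by
        have : (h :: t).all (fun x => x == h) = false := by
          simp only [List.all_eq_false]
          push_neg at hall
          obtain ⟨x, hx, hxne⟩ := hall
          exact ⟨x, hx, by simp [hxne]⟩
        simp [jedvrijednosti_alt, this]
      rw [jedvrijednosti, hA, hB]
      congr 1
      rw [decide_eq_decide, exists_count_two_iff, ofList_len_ne_iff]
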